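-- pv_equiv track=rewrite | github.com/ErfanShahbazzadeh/Compiler | Lexical Analysis/Lexical Analysis.py | elif_checker
-- ===== SOURCE A (Python) =====
-- def elif_checker(lexeme):
--     state = 1
--     flag = False
--     for ch in lexeme:
--         match state:
--             case 1:
--                 if ch == "e":
--                     state = 2
--                 else:
--                     return False
--             case 2:
--                 if ch == "l":
--                     state = 3
--                 else:
--                     return False
--             case 3:
--                 if ch == "i":
--                     state = 4
--                 else:
--                     return False
--             case 4:
--                 if ch == "f":
--                     flag = True
--                     state = 5
--                 else:
--                     return False
--             case 5:
--                 if 'a' <= ch <= 'z' or 'A' <= ch <= 'Z' or ch == "_" or "0" <= ch <= "9":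
--                     return False
--     if flag:
--         return True
-- ===== SOURCE B (Python) =====
-- def elif_checker(lexeme):
--     if lexeme[:4] != 'elif':
--         return False
--     return not any('a' <= c <= 'z' or 'A' <= c <= 'Z' or c == '_' or '0' <= c <= '9'
--                    for c in lexeme[4:])
-- ===== Notes on version B (the rewrite author's own statement) =====
-- stated objective: simpler
-- what changed: Replaces the five-state DFA loop with two shaped passes (a prefix-slice comparison, then an any() scan over only the tail); Pre_ excludes the proper prefixes of 'elif' ('', 'e', 'el', 'eli'), where A falls through and returns None instead of a bool.
-- outside the precondition, e.g. on elif_checker('eli'): A returns None, B returns False; on elif_checker(''): A returns None, B returns False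
import Mathlib
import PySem

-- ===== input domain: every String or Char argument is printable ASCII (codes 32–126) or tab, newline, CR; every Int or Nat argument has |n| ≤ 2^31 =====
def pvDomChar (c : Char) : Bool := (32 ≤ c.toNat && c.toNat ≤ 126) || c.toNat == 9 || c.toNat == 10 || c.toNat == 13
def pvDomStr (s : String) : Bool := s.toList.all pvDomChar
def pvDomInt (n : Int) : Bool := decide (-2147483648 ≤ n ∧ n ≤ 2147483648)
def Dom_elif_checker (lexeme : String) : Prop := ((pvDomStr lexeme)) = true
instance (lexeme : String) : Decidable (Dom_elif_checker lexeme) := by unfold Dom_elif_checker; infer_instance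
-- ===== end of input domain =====

-- B replaces A's five-state DFA loop with two shaped passes (a prefix-slice comparison,
-- then an any-scan of only the tail); objective: simpler. Pre_ excludes the proper
-- prefixes of 'elif', where A returns None (no bool).


-- ===== PORT A =====
-- literal DFA loop: state / flag carried through the character list;
-- early 'return False' = some false; implicit None at the end = none
def elifLoopA : Nat → Bool → List Char → Option Bool
  | _, flag, [] => if flag then some true else none
  | state, flag, ch :: rest =>
    match state with
    | 1 => if ch = 'e' then elifLoopA 2 flag rest else some false
    | 2 => if ch = 'l' then elifLoopA 3 flag rest else some false
    | 3 => if ch = 'i' then elifLoopA 4 flag rest else some false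
    | 4 => if ch = 'f' then elifLoopA 5 true rest else some false
    | 5 => if ('a' ≤ ch && ch ≤ 'z') || ('A' ≤ ch && ch ≤ 'Z') || ch = '_' || ('0' ≤ ch && ch ≤ '9')
           then some false else elifLoopA 5 flag rest
    | _ => elifLoopA state flag rest   -- unreachable: match with no case does nothing

def elif_checker (lexeme : String) : Option Bool :=
  elifLoopA 1 false lexeme.toList

-- ===== PORT B =====
def pvIsIdent (c : Char) : Bool :=
  ('a' ≤ c && c ≤ 'z') || ('A' ≤ c && c ≤ 'Z') || c = '_' || ('0' ≤ c && c ≤ '9')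

def elif_checker_alt (lexeme : String) : Option Bool :=
  if PySem.List.slice lexeme.toList none (some 4) ≠ "elif".toList then some false
  else some (!(PySem.List.slice lexeme.toList (some 4) none).any pvIsIdent)

-- ===== PRECONDITION & SPEC =====
-- Pre_ excludes the four proper prefixes of 'elif' ('', 'e', 'el', 'eli'): there A
-- falls off the loop with flag unset and returns None, not a bool; B returns False.
def Pre_elif_checker (lexeme : String) : Prop :=
  lexeme.toList ∉ [([] : List Char), ['e'], ['e','l'], ['e','l','i']]
instance (lexeme : String) : Decidable (Pre_elif_checker lexeme) := by unfold Pre_elif_checker; infer_instance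
def pvWitness_elif_checker : String := "elif"

def Spec_elif_checker (lexeme : String) (out : Option Bool) : Prop := out = elif_checker_alt lexeme
instance (lexeme : String) (out : Option Bool) : Decidable (Spec_elif_checker lexeme out) := by unfold Spec_elif_checker; infer_instance

-- ===== CLAIM (what is proved, stated in full; the proofs are below) =====
def Claim_equal_elif_checker : Prop := ∀ (lexeme : String), Dom_elif_checker lexeme → Pre_elif_checker lexeme → Spec_elif_checker lexeme (elif_checker lexeme)

-- ===== LEMMAS AND PROOFS =====
-- in state 5 with flag set, A scans the tail for an identifier char
theorem elifLoopA_five (rest : List Char) :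
    elifLoopA 5 true rest = some (!rest.any pvIsIdent) := by
  induction rest with
  | nil => simp [elifLoopA]
  | cons c cs ih =>
    have hc : (('a' ≤ c && c ≤ 'z') || ('A' ≤ c && c ≤ 'Z') || c = '_' || ('0' ≤ c && c ≤ '9'))
        = pvIsIdent c := rfl
    simp only [elifLoopA, hc, List.any_cons]
    by_cases h : pvIsIdent c <;> simp [h, ih]

-- list-level equivalence by case analysis on the first four characters
theorem main_list (cs : List Char)
    (hpre : cs ∉ [([] : List Char), ['e'], ['e','l'], ['e','l','i']]) :
    elifLoopA 1 false cs =
      (if PySem.List.slice cs none (some 4) ≠ "elif".toList then some false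
       else some (!(PySem.List.slice cs (some 4) none).any pvIsIdent)) := by
  rw [show PySem.List.slice cs none (some 4) = cs.take 4 by simp [pysem],
      show PySem.List.slice cs (some 4) none = cs.drop 4 by simp [pysem]]
  match cs with
  | [] => simp at hpre
  | [a] =>
    by_cases h : a = 'e'
    · subst h; simp at hpre
    · simp [elifLoopA, h]
  | [a, b] =>
    by_cases ha : a = 'e' <;> by_cases hb : b = 'l'
    · subst ha; subst hb; simp at hpre
    all_goals simp [elifLoopA, ha, hb]
  | [a, b, c] =>
    by_cases ha : a = 'e' <;> by_cases hb : b = 'l' <;> by_cases hc : c = 'i'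
    · subst ha; subst hb; subst hc; simp at hpre
    all_goals simp [elifLoopA, ha, hb, hc]
  | a :: b :: c :: d :: rest =>
    by_cases ha : a = 'e' <;> by_cases hb : b = 'l' <;>
      by_cases hc : c = 'i' <;> by_cases hd : d = 'f' <;>
      simp [elifLoopA, ha, hb, hc, hd, elifLoopA_five]

-- ===== VERDICT (by name: the statement is the Claim_ definition above) =====
theorem elif_checker_spec : Claim_equal_elif_checker := by
  intro lexeme _ hpre
  unfold Spec_elif_checker elif_checker elif_checker_alt
  exact main_list lexeme.toList hpre
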